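-- pv_equiv track=rewrite | github.com/JonnyKong/LeetCode | Non_Leetcode/hrt/fancy_number.py | count_fancy
-- ===== SOURCE A (Python) =====
-- def count_fancy(n):
--     if n <= 1:
--         return 0
--     # Convert n to base 4
--     digits = []
--     temp = n
--     while temp > 0:
--         digits.append(temp % 4)
--         temp //= 4
--     L = len(digits)
--
--     # For lengths less than L
--     total = 0
--     for k in range(1, L):
--         total += 2 ** k
--
--     # For length L
--     def count(pos, less):
--         if pos == -1:
--             return 1
--         if less:
--             return 2 ** (pos + 1)
--         d = digits[pos]
--         if d == 0:
--             return count(pos - 1, 0)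
--         elif d == 1:
--             return count(pos - 1, 1) + count(pos - 1, 0)
--         else:
--             return (2 if d > 2 else 1) * count(pos - 1, 1)
--
--     total += count(L - 1, 0)
--     return total
-- ===== SOURCE B (Python) =====
-- def count_fancy(n):
--     if n <= 1:
--         return 0
--     # One fused pass over the base-4 digits, least-significant first, building
--     # no digit list: t is the tight count of the low digits processed so far
--     # (t = 1 for the empty prefix), w = 2**(digits processed).  At the end
--     # w == 2**L, so w - 2 is the total for all shorter lengths.
--     t = 1
--     w = 1
--     temp = n
--     while temp > 0:
--         d = temp % 4
--         if d == 1: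
--             t += w
--         elif d >= 2:
--             t = (2 if d > 2 else 1) * w
--         w *= 2
--         temp //= 4
--     return w - 2 + t
-- ===== Notes on version B (the rewrite author's own statement) =====
-- stated objective: simpler
-- what changed: Replaces A's digit-list construction, explicit short-length summation loop and top-down recursive count(pos, less) helper by one fused least-significant-first while loop over n itself that maintains the running tight count and the current digit weight, using no list and no recursion.
import Mathlib
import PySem

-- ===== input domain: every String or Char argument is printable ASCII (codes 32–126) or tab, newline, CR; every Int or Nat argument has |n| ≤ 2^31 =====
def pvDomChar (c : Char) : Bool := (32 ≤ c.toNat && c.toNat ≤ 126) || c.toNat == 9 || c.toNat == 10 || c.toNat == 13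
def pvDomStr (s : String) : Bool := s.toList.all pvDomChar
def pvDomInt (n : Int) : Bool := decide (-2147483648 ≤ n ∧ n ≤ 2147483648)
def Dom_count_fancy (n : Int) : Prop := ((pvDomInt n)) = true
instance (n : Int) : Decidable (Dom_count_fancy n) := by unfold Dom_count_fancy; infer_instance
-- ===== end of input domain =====

-- B replaces A's digit list, short-length summation loop and recursive count(pos, less)
-- helper by one fused least-significant-first loop over n carrying (tight count, power)
-- state (objective: simpler).


-- ===== PORT A =====
-- A's 'while temp > 0: digits.append(temp % 4); temp //= 4'
def pvToBase4 (temp : Int) : List Int :=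
  if _h : temp > 0 then
    PySem.Int.mod temp 4 :: pvToBase4 (PySem.Int.floordiv temp 4)
  else []
termination_by temp.toNat
decreasing_by
  rw [PySem.Int.floordiv_eq_ediv_of_pos (by omega)]
  omega

-- A's inner 'def count(pos, less)': argument k here stands for pos + 1 (k = 0 is pos == -1).
-- digits[pos] is always in range when called from count_fancy, so getD is exact here.
def pvCountA (digits : List Int) : Nat → Bool → Int
  | 0, _ => 1
  | p + 1, less =>
    if less then 2 ^ (p + 1)
    else
      let d := digits.getD p 0
      if d = 0 then pvCountA digits p false
      else if d = 1 then pvCountA digits p true + pvCountA digits p false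
      else (if d > 2 then 2 else 1) * pvCountA digits p true

def count_fancy (n : Int) : Int :=
  if n ≤ 1 then 0
  else
    let digits := pvToBase4 n
    let L := digits.length
    let total := (PySem.List.pyRange 1 (L : Int) 1).foldl (fun t k => t + 2 ^ k.toNat) 0
    total + pvCountA digits L false

-- ===== PORT B =====
-- B's fused 'while temp > 0' loop carrying the state (t, w); returns w - 2 + t at the end.
def pvLoopB (temp t w : Int) : Int :=
  if _h : temp > 0 then
    let d := PySem.Int.mod temp 4
    let t' := if d = 1 then t + w else if d ≥ 2 then (if d > 2 then 2 else 1) * w else t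
    pvLoopB (PySem.Int.floordiv temp 4) t' (w * 2)
  else w - 2 + t
termination_by temp.toNat
decreasing_by
  rw [PySem.Int.floordiv_eq_ediv_of_pos (by omega)]
  omega

def count_fancy_alt (n : Int) : Int :=
  if n ≤ 1 then 0 else pvLoopB n 1 1

-- ===== PRECONDITION & SPEC =====
def Spec_count_fancy (n : Int) (out : Int) : Prop := out = count_fancy_alt n
instance (n : Int) (out : Int) : Decidable (Spec_count_fancy n out) := by unfold Spec_count_fancy; infer_instance

-- ===== CLAIM (what is proved, stated in full; the proofs are below) =====
def Claim_equal_count_fancy : Prop := ∀ (n : Int), Dom_count_fancy n → Spec_count_fancy n (count_fancy n)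

-- ===== LEMMAS AND PROOFS =====

-- B's per-digit step, replayed over an lsd-first digit list (proof-only helper).
def pvScaled (ds : List Int) (t w : Int) : Int :=
  match ds with
  | [] => t
  | d :: ds =>
      pvScaled ds (if d = 1 then t + w else if d ≥ 2 then (if d > 2 then 2 else 1) * w else t) (w * 2)

-- B's loop is pvScaled over the base-4 digits, plus the closed-form w·2^L − 2.
theorem pvLoopB_eq (temp t w : Int) :
    pvLoopB temp t w = w * 2 ^ (pvToBase4 temp).length - 2 + pvScaled (pvToBase4 temp) t w := by
  rw [pvLoopB, pvToBase4]
  by_cases h : temp > 0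
  · simp only [h, dite_true]
    rw [pvLoopB_eq (PySem.Int.floordiv temp 4)]
    simp only [List.length_cons, pvScaled]
    ring
  · simp [h, pvScaled]
termination_by temp.toNat
decreasing_by
  rw [PySem.Int.floordiv_eq_ediv_of_pos (by omega)]
  omega

-- pvCountA with less = true is the closed power of two.
theorem pvCountA_true (digits : List Int) (k : Nat) : pvCountA digits k true = 2 ^ k := by
  cases k <;> simp [pvCountA]

-- pvCountA only reads indices below k, so a snoc is invisible to it.
theorem pvCountA_append (ds : List Int) (d : Int) (k : Nat) (b : Bool) (hk : k ≤ ds.length) :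
    pvCountA (ds ++ [d]) k b = pvCountA ds k b := by
  induction k generalizing b with
  | zero => simp [pvCountA]
  | succ p ih =>
    have hp : p < ds.length := by omega
    have hget : (ds ++ [d]).getD p 0 = ds.getD p 0 := by
      simp [List.getD, List.getElem?_append_left hp]
    simp only [pvCountA, hget, ih true (by omega), ih false (by omega)]

-- pvScaled satisfies pvCountA's snoc recursion.
theorem pvScaled_append (ds : List Int) (d t w : Int) :
    pvScaled (ds ++ [d]) t w =
      if d = 1 then pvScaled ds t w + w * 2 ^ ds.length
      else if d ≥ 2 then (if d > 2 then 2 else 1) * (w * 2 ^ ds.length)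
      else pvScaled ds t w := by
  induction ds generalizing t w with
  | nil => simp [pvScaled]
  | cons d0 ds ih =>
    simp only [List.cons_append, pvScaled, ih, List.length_cons]
    split_ifs <;> first | (exfalso; omega) | ring

-- Base-4 digits of any integer are nonnegative (mod with positive divisor).
theorem pvToBase4_nonneg (temp : Int) : ∀ x ∈ pvToBase4 temp, 0 ≤ x := by
  rw [pvToBase4]
  split
  · next h =>
    intro x hx
    rcases List.mem_cons.mp hx with rfl | hx
    · exact PySem.Int.mod_nonneg temp (by omega)
    · exact pvToBase4_nonneg (PySem.Int.floordiv temp 4) x hx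
  · simp
termination_by temp.toNat
decreasing_by
  rename_i h _ _
  rw [PySem.Int.floordiv_eq_ediv_of_pos (by omega : (0:Int) < 4)]
  omega

-- pvScaled from the initial state (1, 1) is exactly A's tight count (for nonneg digits).
theorem pvScaled_eq_countA (ds : List Int) (hnn : ∀ x ∈ ds, 0 ≤ x) :
    pvScaled ds 1 1 = pvCountA ds ds.length false := by
  induction ds using List.reverseRecOn with
  | nil => simp [pvScaled, pvCountA]
  | append_singleton ds d ih =>
    have hd : 0 ≤ d := hnn d (by simp)
    have ih := ih (fun x hx => hnn x (by simp [hx]))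
    rw [pvScaled_append, List.length_append]
    simp only [List.length_cons, List.length_nil, Nat.zero_add]
    have hget : (ds ++ [d]).getD ds.length 0 = d := by
      simp [List.getD]
    simp only [pvCountA, Bool.false_eq_true, if_false, hget,
      pvCountA_append ds d ds.length false (le_refl _), pvCountA_true, ih, one_mul]
    split_ifs <;> first | (exfalso; omega) | ring

-- A's short-length loop sums to the closed form 2^L - 2 (for L ≥ 1).
theorem pvSum_eq (L : Nat) (hL : 1 ≤ L) :
    (PySem.List.pyRange 1 (L : Int) 1).foldl (fun t k => t + 2 ^ k.toNat) (0 : Int) = 2 ^ L - 2 := by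
  induction L with
  | zero => omega
  | succ m ih =>
    rcases Nat.eq_zero_or_pos m with h | hm
    · subst h
      norm_num [PySem.List.pyRange_one_eq_nil (le_refl (1 : Int))]
    · have hcast : ((m + 1 : Nat) : Int) = (m : Int) + 1 := by push_cast; ring
      rw [hcast, PySem.List.pyRange_one_succ_right (by exact_mod_cast hm),
          List.foldl_append, ih hm]
      simp only [List.foldl_cons, List.foldl_nil, Int.toNat_natCast, pow_succ]
      ring

theorem pvToBase4_ne_nil (n : Int) (hn : 0 < n) : pvToBase4 n ≠ [] := by
  rw [pvToBase4]
  simp [hn]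

-- ===== VERDICT (by name: the statement is the Claim_ definition above) =====
theorem count_fancy_spec : Claim_equal_count_fancy := by
  intro n _
  unfold Spec_count_fancy count_fancy count_fancy_alt
  split_ifs with h
  · rfl
  · have hL : 1 ≤ (pvToBase4 n).length :=
      List.length_pos_of_ne_nil (pvToBase4_ne_nil n (by omega))
    simp only [pvLoopB_eq, pvScaled_eq_countA _ (pvToBase4_nonneg n)]
    rw [pvSum_eq _ hL]
    ring
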